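-- pv_equiv track=rewrite | github.com/Adhi5061/Leetsync | 1321-get-equal-substrings-within-budget/get-equal-substrings-within-budget.py | equalSubstring
-- ===== SOURCE A (Python) =====
-- def equalSubstring(s: str, t: str, maxCost: int) -> int:
--     res=0
--     left=0
--     right=0
--     currcos=0
--     while(right<len(s)):
--         currcos+=abs(ord(s[right])-ord(t[right]))
--         if(currcos>maxCost):
--             currcos-=abs(ord(s[left])-ord(t[left]))
--             left+=1
--         res=max(res,right-left+1)
--         right+=1
--     return res
-- ===== SOURCE B (Python) =====
-- def equalSubstring(s: str, t: str, maxCost: int) -> int: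
--     # prefix sums of per-index conversion costs + binary search for the
--     # minimal left endpoint of a within-budget window ending at each right
--     P = [0]
--     for a, b in zip(s, t):
--         P.append(P[-1] + abs(ord(a) - ord(b)))
--     res = 0
--     for r in range(len(P) - 1):
--         target = P[r + 1] - maxCost
--         lo, hi = 0, r + 2
--         while lo < hi:
--             mid = (lo + hi) // 2
--             if P[mid] < target:
--                 lo = mid + 1
--             else:
--                 hi = mid
--         if r + 1 - lo > res:
--             res = r + 1 - lo
--     return res
-- ===== Notes on version B (the rewrite author's own statement) =====
-- stated objective: alternative
-- what changed: Replaces the amortized non-shrinking sliding window with a precomputed prefix-sum table and a hand-written binary search for the minimal affordable left endpoint at each right index.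
import Mathlib
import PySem

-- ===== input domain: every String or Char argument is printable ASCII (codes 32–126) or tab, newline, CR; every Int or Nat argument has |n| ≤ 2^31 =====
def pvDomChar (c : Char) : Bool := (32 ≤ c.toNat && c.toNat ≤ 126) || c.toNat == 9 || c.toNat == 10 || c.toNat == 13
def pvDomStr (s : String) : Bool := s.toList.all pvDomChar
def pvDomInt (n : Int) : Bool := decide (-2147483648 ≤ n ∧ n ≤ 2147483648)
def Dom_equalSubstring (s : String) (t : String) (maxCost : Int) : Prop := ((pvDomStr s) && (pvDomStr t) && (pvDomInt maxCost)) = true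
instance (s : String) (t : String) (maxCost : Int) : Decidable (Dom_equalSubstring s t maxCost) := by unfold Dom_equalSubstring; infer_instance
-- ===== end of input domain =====

-- B replaces A's sliding window by prefix sums + binary search per right index (alternative decomposition, not faster).

-- ===== PORT A =====
-- ord(c) in Python = the code point, as an Int
def ordC (c : Char) : Int := (c.toNat : Int)

-- A's while loop: state (res, left, currcos), counter right; indexing via pyGet?
-- (.getD ' ' can only fire out of range, which Pre_ excludes for t and right < len s excludes for s)
def goA (s t : List Char) (maxCost : Int) (res left curr : Int) (right : Nat) (fuel : Nat) : Int :=
  match fuel with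
  | 0 => res
  | fuel + 1 =>
  if right < s.length then
    let curr1 := curr + |ordC ((PySem.List.pyGet? s ((right : Nat) : Int)).getD ' ') -
                        ordC ((PySem.List.pyGet? t ((right : Nat) : Int)).getD ' ')|
    if curr1 > maxCost then
      let curr2 := curr1 - |ordC ((PySem.List.pyGet? s left).getD ' ') -
                           ordC ((PySem.List.pyGet? t left).getD ' ')|
      goA s t maxCost (max res ((right : Int) - (left + 1) + 1)) (left + 1) curr2 (right + 1) fuel
    else
      goA s t maxCost (max res ((right : Int) - left + 1)) left curr1 (right + 1) fuel
  else res

-- fuel = one unit per loop iteration; the call below supplies enough, so it never runs out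
def equalSubstring (s : String) (t : String) (maxCost : Int) : Int :=
  goA s.toList t.toList maxCost 0 0 0 0 s.toList.length

-- ===== PORT B =====
-- the while lo < hi loop of Source B; P[mid] is in range at every call site (mid < hi ≤ len P)
def bsearchB (P : List Int) (target : Int) (lo hi : Nat) (fuel : Nat) : Nat :=
  match fuel with
  | 0 => lo
  | fuel + 1 =>
  if lo < hi then
    let mid := (lo + hi) / 2  -- (lo+hi)//2 on nonnegative ints = Nat division
    if P.getD mid 0 < target then bsearchB P target (mid + 1) hi fuel
    else bsearchB P target lo mid fuel
  else lo

-- the P-building loop of Source B: P = [0]; for a, b in zip(s, t): P.append(P[-1] + abs(ord(a)-ord(b)))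
def buildP (pairs : List (Char × Char)) : List Int :=
  pairs.foldl (fun P ab => P ++ [PySem.List.pyGetD P (-1) 0 + |ordC ab.1 - ordC ab.2|]) [0]

-- the for r in range(len(P)-1) loop of Source B; P[r+1] is in range (r+1 ≤ n < len P)
def goB (P : List Int) (maxCost : Int) (res : Int) (r n : Nat) (fuel : Nat) : Int :=
  match fuel with
  | 0 => res
  | fuel + 1 =>
  if r < n then
    let target := P.getD (r + 1) 0 - maxCost
    let lo := bsearchB P target 0 (r + 2) (r + 2)
    let res' := if ((r : Int) + 1) - (lo : Int) > res then ((r : Int) + 1) - (lo : Int) else res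
    goB P maxCost res' (r + 1) n fuel
  else res

-- fuel = one unit per loop iteration (and hi-lo for the inner search); always sufficient here
def equalSubstring_alt (s : String) (t : String) (maxCost : Int) : Int :=
  let P := buildP (s.toList.zip t.toList)
  goB P maxCost 0 0 (P.length - 1) (P.length - 1)

-- ===== PRECONDITION & SPEC =====
-- A raises IndexError (t[right]) as soon as right reaches len(t) < len(s); Pre_ excludes exactly those inputs.
def Pre_equalSubstring (s : String) (t : String) (maxCost : Int) : Prop :=
  s.toList.length ≤ t.toList.length

instance (s : String) (t : String) (maxCost : Int) : Decidable (Pre_equalSubstring s t maxCost) := by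
  unfold Pre_equalSubstring; infer_instance

def pvWitness_equalSubstring : String × String × Int := ("abcd", "bcdf", 3)

def Spec_equalSubstring (s : String) (t : String) (maxCost : Int) (out : Int) : Prop := out = equalSubstring_alt s t maxCost
instance (s : String) (t : String) (maxCost : Int) (out : Int) : Decidable (Spec_equalSubstring s t maxCost out) := by unfold Spec_equalSubstring; infer_instance

-- ===== CLAIM (what is proved, stated in full; the proofs are below) =====
def Claim_equal_equalSubstring : Prop := ∀ (s : String) (t : String) (maxCost : Int), Dom_equalSubstring s t maxCost → Pre_equalSubstring s t maxCost → Spec_equalSubstring s t maxCost (equalSubstring s t maxCost)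

-- ===== LEMMAS AND PROOFS =====

-- per-index conversion cost, the cost list, its prefix sums
def costP (ab : Char × Char) : Int := |ordC ab.1 - ordC ab.2|

def csL (s t : List Char) : List Int := (s.zip t).map costP

def Pf (cs : List Int) (i : Nat) : Int := (cs.take i).sum

-- A's window width after r steps
def wfun (cs : List Int) (mc : Int) : Nat → Nat
  | 0 => 0
  | r + 1 =>
      if Pf cs (r + 1) - Pf cs (r - wfun cs mc r) ≤ mc then wfun cs mc r + 1 else wfun cs mc r

theorem wfun_le (cs : List Int) (mc : Int) (r : Nat) : wfun cs mc r ≤ r := by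
  induction r with
  | zero => simp [wfun]
  | succ r ih => simp only [wfun]; split <;> omega

theorem csL_nonneg (s t : List Char) : ∀ x ∈ csL s t, 0 ≤ x := by
  intro x hx
  simp only [csL, List.mem_map] at hx
  obtain ⟨ab, _, rfl⟩ := hx
  exact abs_nonneg _

theorem Pf_succ (cs : List Int) (r : Nat) (hr : r < cs.length) :
    Pf cs (r + 1) = Pf cs r + cs.getD r 0 := by
  rw [Pf, Pf, List.take_add_one, List.sum_append, List.getElem?_eq_getElem hr]
  simp [List.getD, List.getElem?_eq_getElem hr]

theorem Pf_mono (cs : List Int) (h0 : ∀ x ∈ cs, 0 ≤ x) {i j : Nat} (hij : i ≤ j) :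
    Pf cs i ≤ Pf cs j := by
  have hsplit : cs.take j = cs.take i ++ (cs.take j).drop i := by
    conv_lhs => rw [← List.take_append_drop i (cs.take j)]
    rw [List.take_take, Nat.min_eq_left hij]
  have hnn : 0 ≤ ((cs.take j).drop i).sum := by
    apply List.sum_nonneg
    intro x hx
    exact h0 x (List.mem_of_mem_take (List.mem_of_mem_drop hx))
  have hsum : (cs.take j).sum = (cs.take i).sum + ((cs.take j).drop i).sum := by
    conv_lhs => rw [hsplit]
    rw [List.sum_append]
  simp only [Pf]
  omega

theorem csL_length (s t : List Char) (h : s.length ≤ t.length) :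
    (csL s t).length = s.length := by
  simp [csL, List.length_zip, Nat.min_eq_left h]

theorem csL_getD (s t : List Char) (h : s.length ≤ t.length) (r : Nat) (hr : r < s.length) :
    (csL s t).getD r 0 = |ordC s[r] - ordC (t[r]'(by omega))| := by
  have hz : r < (s.zip t).length := by simp [List.length_zip]; omega
  rw [csL, List.getD, List.getElem?_map, List.getElem?_eq_getElem hz]
  simp [costP, List.getElem_zip]

-- ===== A side: goA computes wfun =====
theorem goA_eq (s t : List Char) (mc : Int) (hlen : s.length ≤ t.length) :
    ∀ k r, s.length - r ≤ k → r ≤ s.length →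
      goA s t mc (wfun (csL s t) mc r) ((r : Int) - (wfun (csL s t) mc r : Int))
        (Pf (csL s t) r - Pf (csL s t) (r - wfun (csL s t) mc r)) r k
      = (wfun (csL s t) mc s.length : Int) := by
  intro k
  induction k with
  | zero =>
      intro r hk hr
      have : r = s.length := by omega
      subst this
      rfl
  | succ k ih =>
      intro r hk hr
      by_cases hrlt : r < s.length
      case neg =>
        have : r = s.length := by omega
        subst this
        rw [goA, if_neg (by omega)]
      have hrt : r < t.length := by omega
      have hcslen : (csL s t).length = s.length := csL_length s t hlen
      have hw : wfun (csL s t) mc r ≤ r := wfun_le (csL s t) mc r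
      set cs := csL s t with hcs
      set w := wfun cs mc r with hwdef
      rw [goA, if_pos hrlt]
      have hsacc : (PySem.List.pyGet? s ((r : Nat) : Int)).getD ' ' = s[r] := by
        simp [List.getElem?_eq_getElem hrlt]
      have htacc : (PySem.List.pyGet? t ((r : Nat) : Int)).getD ' ' = t[r] := by
        simp [List.getElem?_eq_getElem hrt]
      simp only [hsacc, htacc]
      have hc1 : Pf cs r - Pf cs (r - w) + |ordC s[r] - ordC (t[r]'hrt)| =
          Pf cs (r + 1) - Pf cs (r - w) := by
        rw [← csL_getD s t hlen r hrlt, Pf_succ cs r (by omega)]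
        ring
      rw [hc1]
      by_cases hbr : Pf cs (r + 1) - Pf cs (r - w) > mc
      · rw [if_pos hbr]
        have hlw : ((r : Int) - (w : Int)) = ((r - w : Nat) : Int) := by push_cast; omega
        have hsacc2 : (PySem.List.pyGet? s ((r : Int) - (w : Int))).getD ' '
            = s[r - w]'(by omega) := by
          rw [hlw]
          simp [List.getElem?_eq_getElem (show r - w < s.length by omega)]
        have htacc2 : (PySem.List.pyGet? t ((r : Int) - (w : Int))).getD ' '
            = t[r - w]'(by omega) := by
          rw [hlw]
          simp [List.getElem?_eq_getElem (show r - w < t.length by omega)]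
        simp only [hsacc2, htacc2]
        have hc2 : Pf cs (r + 1) - Pf cs (r - w) -
            |ordC (s[r - w]'(by omega)) - ordC (t[r - w]'(by omega))| =
            Pf cs (r + 1) - Pf cs (r - w + 1) := by
          rw [← csL_getD s t hlen (r - w) (by omega), Pf_succ cs (r - w) (by omega)]
          ring
        have hres : max (w : Int) ((r : Int) - ((r : Int) - (w : Int) + 1) + 1) = (w : Int) := by
          rw [show (r : Int) - ((r : Int) - (w : Int) + 1) + 1 = (w : Int) by ring, max_self]
        rw [hres, hc2]
        have hw1 : wfun cs mc (r + 1) = w := by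
          rw [wfun, ← hwdef, if_neg (by omega)]
        have hih := ih (r + 1) (by omega) (by omega)
        have e1 : (wfun cs mc (r + 1) : Int) = (w : Int) := by rw [hw1]
        have e3 : (r + 1) - wfun cs mc (r + 1) = r - w + 1 := by rw [hw1]; omega
        have e4 : (((r + 1 : Nat)) : Int) - (w : Int) = (r : Int) - (w : Int) + 1 := by
          push_cast; ring
        rw [e1, e3, e4] at hih
        exact hih
      · rw [if_neg hbr]
        have hres : max (w : Int) ((r : Int) - ((r : Int) - (w : Int)) + 1)
            = ((w : Int) + 1) := by
          rw [show (r : Int) - ((r : Int) - (w : Int)) + 1 = (w : Int) + 1 by ring]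
          exact max_eq_right (by omega)
        rw [hres]
        have hw1 : wfun cs mc (r + 1) = w + 1 := by
          rw [wfun, ← hwdef, if_pos (by omega)]
        have hih := ih (r + 1) (by omega) (by omega)
        have e1 : (wfun cs mc (r + 1) : Int) = (w : Int) + 1 := by rw [hw1]; push_cast; ring
        have e3 : (r + 1) - wfun cs mc (r + 1) = r - w := by rw [hw1]; omega
        have e4 : (((r + 1 : Nat)) : Int) - ((w : Int) + 1) = (r : Int) - (w : Int) := by
          push_cast; ring
        rw [e1, e3, e4] at hih
        exact hih

-- ===== B side =====
def psums (x : Int) : List (Char × Char) → List Int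
  | [] => []
  | ab :: rest => (x + costP ab) :: psums (x + costP ab) rest

theorem buildP_foldl (l : List (Char × Char)) :
    ∀ acc : List Int, acc ≠ [] →
      (l.foldl (fun P ab => P ++ [PySem.List.pyGetD P (-1) 0 + |ordC ab.1 - ordC ab.2|]) acc)
      = acc ++ psums (acc.getLastD 0) l := by
  induction l with
  | nil => intro acc _; simp [psums]
  | cons ab rest ih =>
      intro acc hacc
      rw [List.foldl_cons, ih _ (by simp)]
      have hlast : PySem.List.pyGetD acc (-1) 0 = acc.getLastD 0 := by
        rw [PySem.List.pyGetD_neg_one acc 0 hacc, List.getLastD_eq_getLast?,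
          List.getLast?_eq_some_getLast hacc]
        rfl
      simp [hlast, psums, costP]

theorem psums_length (x : Int) (l : List (Char × Char)) : (psums x l).length = l.length := by
  induction l generalizing x with
  | nil => simp [psums]
  | cons ab rest ih => simp [psums, ih]

theorem psums_getD (l : List (Char × Char)) :
    ∀ x j, j < l.length → (psums x l).getD j 0 = x + ((l.map costP).take (j + 1)).sum := by
  induction l with
  | nil => intro x j hj; simp at hj
  | cons ab rest ih =>
      intro x j hj
      cases j with
      | zero => simp [psums]
      | succ j =>
          have := ih (x + costP ab) j (by simpa using hj)
          simp only [psums, List.getD_cons_succ, this, List.map_cons, List.take_succ_cons,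
            List.sum_cons]
          ring

theorem buildP_length (s t : List Char) (h : s.length ≤ t.length) :
    (buildP (s.zip t)).length = s.length + 1 := by
  rw [buildP, buildP_foldl _ [0] (by simp)]
  simp [psums_length, List.length_zip, Nat.min_eq_left h]

theorem buildP_getD (s t : List Char) (h : s.length ≤ t.length) (i : Nat) (hi : i ≤ s.length) :
    (buildP (s.zip t)).getD i 0 = Pf (csL s t) i := by
  rw [buildP, buildP_foldl _ [0] (by simp)]
  cases i with
  | zero => simp [Pf]
  | succ j =>
      have hj : j < (s.zip t).length := by
        simp only [List.length_zip, Nat.min_eq_left h]; omega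
      have h0 : ([0] : List Int).getLastD 0 = 0 := by simp
      simp only [h0, List.cons_append, List.nil_append, List.getD_cons_succ]
      rw [psums_getD _ 0 j hj]
      simp [Pf, csL]

theorem bsearchB_spec (P : List Int) (target : Int)
    (mono : ∀ i j : Nat, i ≤ j → j < P.length → P.getD i 0 ≤ P.getD j 0) :
    ∀ k lo hi, hi - lo ≤ k → lo ≤ hi → hi ≤ P.length →
      lo ≤ bsearchB P target lo hi k ∧ bsearchB P target lo hi k ≤ hi ∧
      (bsearchB P target lo hi k < hi → target ≤ P.getD (bsearchB P target lo hi k) 0) ∧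
      (∀ i, lo ≤ i → i < hi → target ≤ P.getD i 0 → bsearchB P target lo hi k ≤ i) := by
  intro k
  induction k with
  | zero =>
      intro lo hi hk hlohi _
      have : lo = hi := by omega
      subst this
      exact ⟨le_refl _, le_refl _, fun h => absurd h (by simp [bsearchB]),
        fun i h1 h2 _ => by omega⟩
  | succ k ih =>
      intro lo hi hk hlohi hhi
      by_cases hlt : lo < hi
      · rw [bsearchB]
        simp only [hlt, if_true]
        have hmid1 : lo ≤ (lo + hi) / 2 := by omega
        have hmid2 : (lo + hi) / 2 < hi := by omega
        by_cases hb : P.getD ((lo + hi) / 2) 0 < target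
        · simp only [hb, if_true]
          obtain ⟨c1, c2, c3, c4⟩ := ih ((lo + hi) / 2 + 1) hi (by omega) (by omega) hhi
          refine ⟨by omega, c2, c3, ?_⟩
          intro i hi1 hi2 hti
          by_cases hile : i ≤ (lo + hi) / 2
          · exfalso
            have := mono i ((lo + hi) / 2) hile (by omega)
            omega
          · exact c4 i (by omega) hi2 hti
        · simp only [hb, if_false]
          obtain ⟨c1, c2, c3, c4⟩ := ih lo ((lo + hi) / 2) (by omega) (by omega) (by omega)
          refine ⟨c1, by omega, ?_, ?_⟩
          · intro _
            rcases Nat.lt_or_ge (bsearchB P target lo ((lo + hi) / 2) k) ((lo + hi) / 2) with hc | hc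
            · exact c3 hc
            · have : bsearchB P target lo ((lo + hi) / 2) k = (lo + hi) / 2 := by omega
              rw [this]; omega
          · intro i hi1 hi2 hti
            by_cases hile : i < (lo + hi) / 2
            · exact c4 i hi1 hile hti
            · omega
      · rw [bsearchB]
        simp only [hlt, if_false]
        exact ⟨le_refl _, hlohi, fun h => h.elim, fun i h1 h2 _ => by omega⟩

theorem goB_eq (s t : List Char) (mc : Int) (hlen : s.length ≤ t.length) :
    ∀ k r, s.length - r ≤ k → r ≤ s.length →
      (wfun (csL s t) mc r < r →
        mc < Pf (csL s t) r - Pf (csL s t) (r - wfun (csL s t) mc r - 1)) →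
      goB (buildP (s.zip t)) mc (wfun (csL s t) mc r : Int) r s.length k
      = (wfun (csL s t) mc s.length : Int) := by
  have hPlen : (buildP (s.zip t)).length = s.length + 1 := buildP_length s t hlen
  have hPget : ∀ i : Nat, i ≤ s.length → (buildP (s.zip t)).getD i 0 = Pf (csL s t) i :=
    fun i hi => buildP_getD s t hlen i hi
  have hmono : ∀ i j : Nat, i ≤ j → j < (buildP (s.zip t)).length →
      (buildP (s.zip t)).getD i 0 ≤ (buildP (s.zip t)).getD j 0 := by
    intro i j hij hj
    rw [hPget i (by omega), hPget j (by omega)]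
    exact Pf_mono (csL s t) (csL_nonneg s t) hij
  intro k
  induction k with
  | zero =>
      intro r hk hr _
      have : r = s.length := by omega
      subst this
      rfl
  | succ k ih =>
      intro r hk hr hJ
      by_cases hrlt : r < s.length
      case neg =>
        have : r = s.length := by omega
        subst this
        rw [goB, if_neg (by omega)]
      have hw : wfun (csL s t) mc r ≤ r := wfun_le (csL s t) mc r
      set cs := csL s t with hcs
      set w := wfun cs mc r with hwdef
      rw [goB, if_pos hrlt]
      show goB (buildP (s.zip t)) mc
        (if ((r : Int) + 1 -
              (bsearchB (buildP (s.zip t)) ((buildP (s.zip t)).getD (r + 1) 0 - mc) 0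
                (r + 2) (r + 2) : Int) > (w : Int)) then
          ((r : Int) + 1 -
            (bsearchB (buildP (s.zip t)) ((buildP (s.zip t)).getD (r + 1) 0 - mc) 0
              (r + 2) (r + 2) : Int))
        else (w : Int)) (r + 1) s.length k = (wfun cs mc s.length : Int)
      obtain ⟨c1, c2, c3, c4⟩ := bsearchB_spec (buildP (s.zip t))
        ((buildP (s.zip t)).getD (r + 1) 0 - mc) hmono (r + 2) 0 (r + 2)
        (by omega) (by omega) (by omega)
      set lo := bsearchB (buildP (s.zip t)) ((buildP (s.zip t)).getD (r + 1) 0 - mc) 0 (r + 2)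
        (r + 2) with hlo
      rw [hPget (r + 1) (by omega)] at c3 c4
      by_cases hbr : Pf cs (r + 1) - Pf cs (r - w) ≤ mc
      · -- window grows: lo = r - w and the new maximum is w + 1
        have hlo1 : lo ≤ r - w := by
          apply c4 (r - w) (by omega) (by omega)
          rw [hPget (r - w) (by omega)]
          omega
        have hlo2 : r - w ≤ lo := by
          by_contra hcon
          have hlt : lo < r - w := by omega
          have hwr : w < r := by omega
          have h3 := c3 (by omega)
          rw [hPget lo (by omega)] at h3
          have hm1 : Pf cs lo ≤ Pf cs (r - w - 1) :=
            Pf_mono cs (csL_nonneg s t) (by omega)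
          have hm2 : Pf cs r ≤ Pf cs (r + 1) :=
            Pf_mono cs (csL_nonneg s t) (by omega)
          have := hJ hwr
          omega
        have hloeq : lo = r - w := by omega
        have hcond : ((r : Int) + 1 - (lo : Int) > (w : Int)) := by
          rw [hloeq]; push_cast; omega
        rw [if_pos hcond]
        have hw1 : wfun cs mc (r + 1) = w + 1 := by
          rw [wfun, ← hwdef, if_pos hbr]
        have hih := ih (r + 1) (by omega) (by omega) ?_
        · have e1 : (wfun cs mc (r + 1) : Int) = (r : Int) + 1 - (lo : Int) := by
            rw [hw1, hloeq]; push_cast; omega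
          rw [e1] at hih
          exact hih
        · intro hlt2
          rw [hw1] at hlt2 ⊢
          have e : r + 1 - (w + 1) - 1 = r - w - 1 := by omega
          rw [e]
          have hwr : w < r := by omega
          have hm2 : Pf cs r ≤ Pf cs (r + 1) :=
            Pf_mono cs (csL_nonneg s t) (by omega)
          have := hJ hwr
          omega
      · -- window shifts: lo > r - w, the maximum is unchanged
        have hlo2 : r - w + 1 ≤ lo := by
          by_contra hcon
          have hlt : lo ≤ r - w := by omega
          have h3 := c3 (by omega)
          rw [hPget lo (by omega)] at h3
          have hm1 : Pf cs lo ≤ Pf cs (r - w) :=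
            Pf_mono cs (csL_nonneg s t) (by omega)
          omega
        have hcond : ¬ ((r : Int) + 1 - (lo : Int) > (w : Int)) := by
          have : (r - w + 1 : Nat) ≤ (lo : Nat) := hlo2
          push_cast
          omega
        rw [if_neg hcond]
        have hw1 : wfun cs mc (r + 1) = w := by
          rw [wfun, ← hwdef, if_neg hbr]
        have hih := ih (r + 1) (by omega) (by omega) ?_
        · rw [hw1] at hih
          exact hih
        · intro _
          rw [hw1]
          have e : r + 1 - w - 1 = r - w := by omega
          rw [e]
          omega

-- ===== VERDICT (by name: the statement is the Claim_ definition above) =====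
theorem equalSubstring_spec : Claim_equal_equalSubstring := by
  intro s t mc _hd hpre
  unfold Spec_equalSubstring equalSubstring equalSubstring_alt
  have hlen : s.toList.length ≤ t.toList.length := hpre
  have hA := goA_eq s.toList t.toList mc hlen s.toList.length 0 (by omega) (by omega)
  have hB := goB_eq s.toList t.toList mc hlen s.toList.length 0 (by omega) (by omega)
      (by intro h; simp [wfun] at h)
  simp only [wfun, Pf, List.take_zero, List.sum_nil, Nat.zero_sub, Nat.cast_zero,
    sub_self] at hA hB
  show goA s.toList t.toList mc 0 0 0 0 s.toList.length =
    goB (buildP (s.toList.zip t.toList)) mc 0 0 ((buildP (s.toList.zip t.toList)).length - 1)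
      ((buildP (s.toList.zip t.toList)).length - 1)
  rw [buildP_length s.toList t.toList hlen, Nat.add_sub_cancel, hA, ← hB]
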